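-- pv_equiv track=rewrite | github.com/farhatkevin/nvflare | examples/advanced/llm_hf/src/pretrain_nvflare.py | group_tokens
-- ===== SOURCE A (Python) =====
-- from itertools import chain
--
-- def group_tokens(examples, block_size):
--     """Pack token IDs into fixed-length blocks for causal-LM pre-training."""
--     # Check the structure of examples["text"] to handle different formats
--     if isinstance(examples["text"][0], int):
--         # If text contains direct integers (tokens), no need to flatten
--         all_tokens = examples["text"]
--     else:
--         # If text contains lists of tokens, flatten with chain
--         all_tokens = list(chain.from_iterable(examples["text"]))
--
--     # Calculate total length that fits evenly into blocks
--     total_len = (len(all_tokens) // block_size) * block_size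
--
--     # Create blocks of fixed size
--     result = {
--         "input_ids": [all_tokens[i:i + block_size] for i in range(0, total_len, block_size)],
--     }
--
--     # For causal LM, labels are the same as input_ids
--     result["labels"] = result["input_ids"].copy()
--
--     return result
-- ===== SOURCE B (Python) =====
-- def group_tokens(examples, block_size):
--     """Pack token IDs into fixed-length blocks for causal-LM pre-training.
--
--     Streaming re-implementation: instead of flattening everything and then
--     slicing with a stepped range, keep a running buffer and pop off a block
--     whenever block_size tokens have accumulated; the final partial buffer is
--     the dropped remainder.
--     """
--     text = examples["text"]
--     if isinstance(text[0], int):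
--         # flat token list: treat it as a single chunk
--         chunks = [text]
--     else:
--         chunks = text
--
--     blocks = []
--     buffer = []
--     for chunk in chunks:
--         buffer.extend(chunk)
--         while block_size > 0 and len(buffer) >= block_size:
--             blocks.append(buffer[:block_size])
--             del buffer[:block_size]
--
--     result = {"input_ids": blocks}
--     result["labels"] = result["input_ids"].copy()
--     return result
-- ===== Notes on version B (the rewrite author's own statement) =====
-- stated objective: alternative
-- what changed: Replaces flatten-everything-then-slice-with-a-stepped-range by a single streaming pass that keeps a running buffer and pops off a completed block each time block_size tokens have accumulated, discarding the final partial buffer.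
import Mathlib
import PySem

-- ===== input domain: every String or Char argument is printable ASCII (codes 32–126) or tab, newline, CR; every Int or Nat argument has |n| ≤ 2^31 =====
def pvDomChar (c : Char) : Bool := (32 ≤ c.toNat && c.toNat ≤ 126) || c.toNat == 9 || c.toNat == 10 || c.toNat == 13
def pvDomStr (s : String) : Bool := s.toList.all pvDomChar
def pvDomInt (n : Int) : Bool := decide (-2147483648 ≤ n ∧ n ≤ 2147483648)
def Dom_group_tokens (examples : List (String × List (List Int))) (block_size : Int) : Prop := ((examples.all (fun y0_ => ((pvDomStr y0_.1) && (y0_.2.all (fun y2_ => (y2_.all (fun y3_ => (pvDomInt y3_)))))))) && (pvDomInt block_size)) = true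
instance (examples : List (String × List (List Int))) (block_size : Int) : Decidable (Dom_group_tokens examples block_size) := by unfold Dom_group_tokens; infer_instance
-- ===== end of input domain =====

-- B packs the same blocks by one streaming pass with a running buffer instead of flatten-then-stepped-range slicing; equivalence is about the return value (the Python builds fresh lists either way).

-- ===== PORT A =====
def group_tokens (examples : List (String × List (List Int))) (block_size : Int) : List (String × List (List Int)) :=
  -- examples["text"] : first match; a missing key is Python's KeyError (outside Pre_)
  match (PySem.Dict.mk examples).get? "text" with
  | none => []
  | some text =>
    -- examples["text"][0]: IndexError on an empty list (outside Pre_); under this type the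
    -- element is always a list, so the isinstance(..., int) branch never fires
    match PySem.List.pyGet? text 0 with
    | none => []
    | some _ =>
      -- all_tokens = list(chain.from_iterable(examples["text"]))
      let all_tokens := text.flatten
      -- total_len = (len(all_tokens) // block_size) * block_size ; // by 0 is ZeroDivisionError (outside Pre_)
      if block_size = 0 then []
      else
        let total_len := (PySem.Int.floordiv (all_tokens.length : Int) block_size) * block_size
        let input_ids := (PySem.List.pyRange 0 total_len block_size).map
          (fun i => PySem.List.slice all_tokens (some i) (some (i + block_size)))
        [("input_ids", input_ids), ("labels", input_ids)]

-- ===== PORT B =====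
-- while block_size > 0 and len(buffer) >= block_size: blocks.append(buffer[:block_size]); del buffer[:block_size]
-- (take/drop of block_size.toNat is exact here: the guard gives 0 < block_size)
def drainLoop (bs : Int) (blocks : List (List Int)) (buffer : List Int) : List (List Int) × List Int :=
  if h : 0 < bs ∧ bs ≤ (buffer.length : Int) then
    drainLoop bs (blocks ++ [buffer.take bs.toNat]) (buffer.drop bs.toNat)
  else (blocks, buffer)
termination_by buffer.length
decreasing_by simp; omega

def group_tokens_alt (examples : List (String × List (List Int))) (block_size : Int) : List (String × List (List Int)) :=
  match (PySem.Dict.mk examples).get? "text" with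
  | none => []          -- KeyError (outside Pre_)
  | some text =>
    match PySem.List.pyGet? text 0 with
    | none => []        -- IndexError (outside Pre_); element is always a list here, int branch never fires
    | some _ =>
      let st := text.foldl (fun (s : List (List Int) × List Int) chunk =>
        drainLoop block_size s.1 (s.2 ++ chunk)) ([], [])
      [("input_ids", st.1), ("labels", st.1)]

-- ===== PRECONDITION & SPEC =====
-- Pre_ excludes exactly the inputs where the Python A raises: a missing "text" key (KeyError),
-- an empty "text" list (IndexError on [0]) and block_size = 0 (ZeroDivisionError).
def Pre_group_tokens (examples : List (String × List (List Int))) (block_size : Int) : Prop :=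
  block_size ≠ 0 ∧ ((PySem.Dict.mk examples).get? "text").getD [] ≠ []
instance (examples : List (String × List (List Int))) (block_size : Int) : Decidable (Pre_group_tokens examples block_size) := by unfold Pre_group_tokens; infer_instance

def pvWitness_group_tokens : (List (String × List (List Int))) × Int :=
  ([("text", [[1, 2, 3], [4, 5]])], 2)

def Spec_group_tokens (examples : List (String × List (List Int))) (block_size : Int) (out : List (String × List (List Int))) : Prop := out = group_tokens_alt examples block_size
instance (examples : List (String × List (List Int))) (block_size : Int) (out : List (String × List (List Int))) : Decidable (Spec_group_tokens examples block_size out) := by unfold Spec_group_tokens; infer_instance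

-- ===== CLAIM (what is proved, stated in full; the proofs are below) =====
def Claim_equal_group_tokens : Prop := ∀ (examples : List (String × List (List Int))) (block_size : Int), Dom_group_tokens examples block_size → Pre_group_tokens examples block_size → Spec_group_tokens examples block_size (group_tokens examples block_size)

-- ===== LEMMAS AND PROOFS =====

-- reference chunker: repeatedly split off the first n elements while they fit
def chunkRem (n : Nat) (l : List Int) : List (List Int) × List Int :=
  if h : 0 < n ∧ n ≤ l.length then
    let p := chunkRem n (l.drop n)
    (l.take n :: p.1, p.2)
  else ([], l)
termination_by l.length
decreasing_by simp; omega

lemma chunkRem_snd_lt (n : Nat) (hn : 0 < n) (l : List Int) : (chunkRem n l).2.length < n := by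
  induction l using chunkRem.induct n with
  | case1 l h ih => rw [chunkRem]; simp [h]; exact ih
  | case2 l h => rw [chunkRem]; simp [h]; omega

lemma drainLoop_spec (bs : Int) (hbs : 0 < bs) (blocks : List (List Int)) (buffer : List Int) :
    drainLoop bs blocks buffer =
      (blocks ++ (chunkRem bs.toNat buffer).1, (chunkRem bs.toNat buffer).2) := by
  induction buffer using chunkRem.induct bs.toNat generalizing blocks with
  | case1 l h ih =>
    rw [drainLoop, chunkRem]
    have h' : 0 < bs ∧ bs ≤ (l.length : Int) := by constructor <;> omega
    simp only [h', dif_pos, h, ih]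
    simp
  | case2 l h =>
    rw [drainLoop, chunkRem]
    have h' : ¬ (0 < bs ∧ bs ≤ (l.length : Int)) := by omega
    simp [h', h]

lemma drainLoop_nonpos (bs : Int) (hbs : bs ≤ 0) (blocks : List (List Int)) (buffer : List Int) :
    drainLoop bs blocks buffer = (blocks, buffer) := by
  rw [drainLoop]
  have h' : ¬ (0 < bs ∧ bs ≤ (buffer.length : Int)) := by omega
  simp [h']

lemma chunkRem_append (n : Nat) (hn : 0 < n) (x y : List Int) :
    chunkRem n (x ++ y) =
      ((chunkRem n x).1 ++ (chunkRem n ((chunkRem n x).2 ++ y)).1,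
       (chunkRem n ((chunkRem n x).2 ++ y)).2) := by
  induction x using chunkRem.induct n with
  | case1 l h ih =>
    rw [chunkRem, show chunkRem n l = _ from by rw [chunkRem]]
    have h2 : n ≤ (l ++ y).length := by simp; omega
    simp only [h, hn, true_and, and_true, dif_pos, h2,
      List.take_append_of_le_length h.2, List.drop_append_of_le_length h.2]
    simp [ih]
  | case2 l h =>
    have h2 : chunkRem n l = ([], l) := by rw [chunkRem]; simp [h]
    simp [h2]

lemma foldl_drain_nonpos (bs : Int) (hbs : bs ≤ 0) (subs : List (List Int))
    (blocks : List (List Int)) (buffer : List Int) :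
    subs.foldl (fun (s : List (List Int) × List Int) chunk =>
      drainLoop bs s.1 (s.2 ++ chunk)) (blocks, buffer) = (blocks, buffer ++ subs.flatten) := by
  induction subs generalizing buffer with
  | nil => simp
  | cons c cs ih => rw [List.foldl_cons, drainLoop_nonpos bs hbs, ih]; simp

lemma foldl_drain_pos (bs : Int) (hbs : 0 < bs) (subs : List (List Int))
    (blocks : List (List Int)) (buffer : List Int) (hbuf : buffer.length < bs.toNat) :
    subs.foldl (fun (s : List (List Int) × List Int) chunk =>
      drainLoop bs s.1 (s.2 ++ chunk)) (blocks, buffer) =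
      (blocks ++ (chunkRem bs.toNat (buffer ++ subs.flatten)).1,
       (chunkRem bs.toNat (buffer ++ subs.flatten)).2) := by
  have hn : 0 < bs.toNat := by omega
  induction subs generalizing blocks buffer with
  | nil =>
    have hch : chunkRem bs.toNat buffer = ([], buffer) := by
      rw [chunkRem, dif_neg (by omega : ¬ (0 < bs.toNat ∧ bs.toNat ≤ buffer.length))]
    simp [hch]
  | cons c cs ih =>
    rw [List.foldl_cons, drainLoop_spec bs hbs]
    rw [ih _ _ (chunkRem_snd_lt bs.toNat hn (buffer ++ c))]
    rw [List.flatten_cons, show buffer ++ (c ++ cs.flatten) = (buffer ++ c) ++ cs.flatten by simp,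
      chunkRem_append bs.toNat hn (buffer ++ c) cs.flatten]
    simp

-- A's stepped range of slices, characterised as take/drop blocks
lemma chunkRem_fst_eq (n : Nat) (hn : 0 < n) (l : List Int) :
    (chunkRem n l).1 = (List.range (l.length / n)).map (fun k => (l.drop (n * k)).take n) := by
  induction l using chunkRem.induct n with
  | case1 l h ih =>
    rw [chunkRem]
    have hq : l.length / n = (l.drop n).length / n + 1 := by
      rw [List.length_drop]
      rcases Nat.exists_eq_add_of_le h.2 with ⟨m, hm⟩
      rw [hm, Nat.add_sub_cancel_left, Nat.add_comm, Nat.add_div_right _ hn]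
    simp only [h, dif_pos, hq, List.range_succ_eq_map, List.map_cons, List.map_map]
    refine congrArg₂ List.cons (by simp) ?_
    rw [ih]
    apply List.map_congr_left
    intro k _
    simp [Nat.mul_succ, Nat.mul_comm, List.drop_drop, Nat.add_comm]
  | case2 l h =>
    rw [chunkRem]
    have hlt : l.length < n := by omega
    have : l.length / n = 0 := Nat.div_eq_of_lt hlt
    simp [h, this]

lemma pyRange_slices_eq (bs : Int) (hbs : 0 < bs) (l : List Int) :
    (PySem.List.pyRange 0 ((PySem.Int.floordiv (l.length : Int) bs) * bs) bs).map
        (fun i => PySem.List.slice l (some i) (some (i + bs))) =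
      (List.range (l.length / bs.toNat)).map (fun k => (l.drop (bs.toNat * k)).take bs.toNat) := by
  have hbn : bs = (bs.toNat : Int) := by omega
  set n := bs.toNat with hn
  have hn0 : 0 < n := by omega
  set q := l.length / n with hq
  have hfd : PySem.Int.floordiv (l.length : Int) bs = (q : Int) := by
    rw [hbn, PySem.Int.floordiv_natCast]
  rw [hfd, PySem.List.pyRange_of_pos _ _ hbs]
  have hcnt : (if (0:Int) < (q : Int) * bs then ((((q : Int) * bs) - 0 + bs - 1) / bs).toNat else 0) = q := by
    by_cases hq0 : 0 < q
    · have hpos : (0:Int) < (q : Int) * bs := by positivity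
      rw [if_pos hpos]
      have : ((q : Int) * bs - 0 + bs - 1) = (bs - 1) + (q : Int) * bs := by ring
      rw [this, Int.add_mul_ediv_right _ _ (by omega : bs ≠ 0),
        Int.ediv_eq_zero_of_lt (by omega) (by omega)]
      omega
    · have : q = 0 := Nat.eq_zero_of_not_pos hq0
      simp [this]
  rw [hcnt, List.map_map]
  apply List.map_congr_left
  intro k hk
  simp only [Function.comp_apply, Int.zero_add]
  have h1 : bs * (k : Int) = ((n * k : Nat) : Int) := by rw [hbn]; push_cast; ring
  have h2 : bs * (k : Int) + bs = ((n * k : Nat) : Int) + (n : Int) := by rw [h1, hbn]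
  rw [h2, h1, PySem.List.slice_natCast_add]

-- ===== VERDICT (by name: the statement is the Claim_ definition above) =====
theorem group_tokens_spec : Claim_equal_group_tokens := by
  intro examples block_size _ hpre
  unfold Spec_group_tokens group_tokens group_tokens_alt
  obtain ⟨hbs, htext⟩ := hpre
  cases hget : (PySem.Dict.mk examples).get? "text" with
  | none => rw [hget] at htext
  | some text =>
    rw [hget] at htext
    simp only [Option.getD_some] at htext
    have hfirst : ∃ x, PySem.List.pyGet? text 0 = some x := by
      cases text with
      | nil => simp at htext
      | cons t ts => exact ⟨t, by simp [PySem.List.pyGet?, PySem.List.pyIdx?]⟩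
    obtain ⟨x, hx⟩ := hfirst
    simp only [hx, if_neg hbs]
    rcases lt_or_gt_of_ne hbs with hneg | hpos
    · -- block_size < 0 : both sides produce no blocks
      rw [foldl_drain_nonpos block_size (by omega)]
      have hT : 0 ≤ (PySem.Int.floordiv (text.flatten.length : Int) block_size) * block_size := by
        have hmod := PySem.Int.floordiv_mul_add_mod (text.flatten.length : Int) block_size
        have hm := (PySem.Int.mod_neg_bounds (a := (text.flatten.length : Int)) (by omega : block_size < 0)).2
        have hl : (0:Int) ≤ (text.flatten.length : Int) := by positivity
        linarith
      have hrange : PySem.List.pyRange 0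
          ((PySem.Int.floordiv (text.flatten.length : Int) block_size) * block_size) block_size = [] := by
        have h1 : ¬ (0 < block_size) := by omega
        have h2 : ¬ ((PySem.Int.floordiv (text.flatten.length : Int) block_size) * block_size < 0) := by omega
        unfold PySem.List.pyRange
        rw [if_neg hbs, if_neg h1, if_neg h2]
        simp
      rw [hrange]
      simp
    · -- block_size > 0 : both sides are the full chunking of the flattened tokens
      rw [foldl_drain_pos block_size hpos _ _ _ (by simp; omega)]
      rw [pyRange_slices_eq block_size hpos]
      rw [chunkRem_fst_eq block_size.toNat (by omega)]
      simp
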